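-- pv_equiv track=rewrite | github.com/ksj15242/Algorithm | 프로그래머스/2/17677. ［1차］ 뉴스 클러스터링/［1차］ 뉴스 클러스터링.py | getMultiCountSet
-- ===== SOURCE A (Python) =====
-- def getMultiCountSet(s):
--     n = len(s)
--
--     dic = {}
--     for i in range(n-1):
--         st = (s[i]+s[i+1]).lower()
--
--         if st.isalpha() and st.isascii():
--             dic[st] = dic.get(st,0)+1
--
--     return dic
-- ===== SOURCE B (Python) =====
-- def getMultiCountSet(s):
--     # Divide and conquer: split the string into two overlapping halves (sharing one
--     # character so every adjacent bigram lands in exactly one half), count each half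
--     # recursively, and merge the two count dicts by adding values.
--     def conquer(t):
--         if len(t) <= 2:
--             st = t.lower()
--             if len(st) == 2 and st.isalpha() and st.isascii():
--                 return {st: 1}
--             return {}
--         m = len(t) // 2
--         left = conquer(t[:m + 1])
--         right = conquer(t[m:])
--         for k, v in right.items():
--             left[k] = left.get(k, 0) + v
--         return left
--
--     return conquer(s)
-- ===== Notes on version B (the rewrite author's own statement) =====
-- stated objective: alternative
-- what changed: Replaces A's single indexed left-to-right dict-accumulation loop with a divide-and-conquer recursion: the string is split into two halves overlapping by one character (so each adjacent bigram falls in exactly one half), each half is counted recursively, and the two count dicts are merged by adding values.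
import Mathlib
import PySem

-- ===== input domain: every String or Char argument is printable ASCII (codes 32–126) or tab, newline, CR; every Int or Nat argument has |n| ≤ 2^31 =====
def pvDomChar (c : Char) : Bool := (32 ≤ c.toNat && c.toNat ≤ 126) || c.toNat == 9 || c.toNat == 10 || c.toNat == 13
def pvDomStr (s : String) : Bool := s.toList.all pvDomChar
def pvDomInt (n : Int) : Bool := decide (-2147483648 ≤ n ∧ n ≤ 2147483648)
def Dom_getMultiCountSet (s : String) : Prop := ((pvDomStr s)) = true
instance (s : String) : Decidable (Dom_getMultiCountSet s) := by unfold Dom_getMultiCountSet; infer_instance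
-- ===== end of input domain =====

-- B replaces A's single indexed accumulation loop by divide-and-conquer: split the string into
-- two overlapping halves, count each half recursively, merge the count dicts (alternative decomposition, same result).

-- ===== PORT A =====
-- st.isascii() is ported by hand (not in PySem): all code points ≤ 127 — exact for every string.
def getMultiCountSet (s : String) : List (String × Int) :=
  let cs := s.toList
  let n := PySem.Str.len s
  let dic := (PySem.List.pyRange 0 (n - 1) 1).foldl
    (fun (d : PySem.Dict String Int) i =>
      let st := PySem.Chars.lower [PySem.List.pyGetD cs i ' ', PySem.List.pyGetD cs (i + 1) ' ']
      if PySem.Chars.strIsalpha st && st.all (fun c => c.toNat ≤ 127) then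
        d.insert (String.ofList st) (d.getD (String.ofList st) 0 + 1)
      else d)
    PySem.Dict.empty
  dic.items

-- ===== PORT B =====
-- conquer: the slices t[:m+1] and t[m:] (with 0 ≤ m ≤ len(t)) are List.take (m+1) / List.drop m
-- (exactly PySem.List.slice_to / slice_from); st.isascii() again ported as all code points ≤ 127.
def pvConquer (cs : List Char) : PySem.Dict String Int :=
  if cs.length ≤ 2 then
    let st := PySem.Chars.lower cs
    if st.length == 2 && PySem.Chars.strIsalpha st && st.all (fun c => c.toNat ≤ 127) then
      PySem.Dict.ofList [(String.ofList st, 1)]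
    else PySem.Dict.empty
  else
    let m := cs.length / 2
    let left := pvConquer (cs.take (m + 1))
    let right := pvConquer (cs.drop m)
    right.items.foldl (fun d p => d.insert p.1 (d.getD p.1 0 + p.2)) left
termination_by cs.length
decreasing_by
  · simp only [List.length_take]; omega
  · simp only [List.length_drop]; omega

def getMultiCountSet_alt (s : String) : List (String × Int) :=
  (pvConquer s.toList).items

-- ===== PRECONDITION & SPEC =====
def Spec_getMultiCountSet (s : String) (out : List (String × Int)) : Prop := out = getMultiCountSet_alt s
instance (s : String) (out : List (String × Int)) : Decidable (Spec_getMultiCountSet s out) := by unfold Spec_getMultiCountSet; infer_instance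

-- ===== CLAIM (what is proved, stated in full; the proofs are below) =====
def Claim_equal_getMultiCountSet : Prop := ∀ (s : String), Dom_getMultiCountSet s → Spec_getMultiCountSet s (getMultiCountSet s)

-- ===== LEMMAS AND PROOFS =====

-- the list of adjacent bigrams of a character list
def pvAdj : List Char → List (List Char)
  | a :: b :: r => [a, b] :: pvAdj (b :: r)
  | _ => []

-- the valid lowered bigrams of cs, as Strings: the common characterisation of both programs
def pvVB (cs : List Char) : List String :=
  (((pvAdj cs).map PySem.Chars.lower).filter
    (fun st => PySem.Chars.strIsalpha st && st.all (fun c => c.toNat ≤ 127))).map String.ofList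

-- A guarded accumulation loop is the plain fold over the filtered mapped list.
lemma foldl_if_filter {α β γ : Type} (l : List α) (f : α → β) (p : β → Bool)
    (g : γ → β → γ) (init : γ) :
    l.foldl (fun d i => if p (f i) then g d (f i) else d) init
      = ((l.map f).filter p).foldl g init := by
  induction l generalizing init with
  | nil => rfl
  | cons x xs ih =>
    by_cases h : p (f x) = true
    · simp [h, ih]
    · simp [h, ih]

-- indexed bigram extraction is pvAdj (Nat-index form)
lemma adj_range : ∀ (cs : List Char),
    (List.range (cs.length - 1)).map (fun k => [cs.getD k ' ', cs.getD (k + 1) ' ']) = pvAdj cs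
  | [] => by simp [pvAdj]
  | [a] => by simp [pvAdj]
  | a :: b :: r => by
    have ih := adj_range (b :: r)
    simp only [List.length_cons, Nat.add_sub_cancel, List.range_succ_eq_map, List.map_cons,
      List.map_map] at *
    simp [pvAdj, Function.comp_def, ← ih]

-- pvAdj splits at any cut with one character of overlap
lemma adj_split : ∀ (cs : List Char) (k : Nat),
    pvAdj (cs.take (k + 1)) ++ pvAdj (cs.drop k) = pvAdj cs
  | [], k => by simp [pvAdj]
  | [a], k => by cases k <;> simp [pvAdj]
  | a :: b :: r, 0 => by simp [pvAdj]
  | a :: b :: r, (k + 1) => by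
    have ih := adj_split (b :: r) k
    simpa [pvAdj, List.take_succ_cons, List.drop_succ_cons] using ih

lemma vb_split (cs : List Char) (k : Nat) :
    pvVB (cs.take (k + 1)) ++ pvVB (cs.drop k) = pvVB cs := by
  simp only [pvVB, ← adj_split cs k, List.map_append, List.filter_append]

-- the value at one key after the dict-merge loop
lemma getD_foldl_addEntry (L : List (String × Int)) (d : PySem.Dict String Int) (k : String) :
    (L.foldl (fun d p => d.insert p.1 (d.getD p.1 0 + p.2)) d).getD k 0
      = d.getD k 0 + ((L.filter (fun p => p.1 == k)).map Prod.snd).sum := by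
  induction L generalizing d with
  | nil => simp
  | cons p L ih =>
    by_cases h : p.1 = k
    · simp [ih, h]
      ring
    · simp [ih, PySem.Dict.getD_insert, h, Ne.symm h]

lemma filter_beq_of_nodup (l : List String) (h : l.Nodup) (k : String) :
    l.filter (· == k) = if k ∈ l then [k] else [] := by
  induction l with
  | nil => simp
  | cons x xs ih =>
    simp only [List.nodup_cons] at h
    by_cases hx : x = k
    · subst hx
      simp [h.1, ih h.2]
    · simp [hx, ih h.2, Ne.symm hx]

-- merging two counters (the Python dict-merge loop) is the counter of the concatenation
lemma merge_counters (A B : List String) :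
    (PySem.Dict.counter B).items.foldl (fun d p => d.insert p.1 (d.getD p.1 0 + p.2))
        (PySem.Dict.counter A)
      = PySem.Dict.counter (A ++ B) := by
  apply PySem.Dict.ext
  have hkeys : ((PySem.Dict.counter B).items.foldl
      (fun d p => d.insert p.1 (d.getD p.1 0 + p.2)) (PySem.Dict.counter A)).keys
      = PySem.Set.ofList (A ++ B) := by
    rw [PySem.Dict.keys_foldl_insert_key]
    have : (PySem.Dict.counter B).items.map Prod.fst = PySem.Set.ofList B := by
      have := PySem.Dict.keys_counter (xs := B)
      simpa [PySem.Dict.keys] using this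
    rw [this, PySem.Dict.keys_counter, PySem.Set.ofList_append,
      PySem.Set.update_eq_append_filter, PySem.Set.update_eq_append_filter,
      PySem.Set.ofList_ofList]
  have hnod : ((PySem.Dict.counter B).items.foldl
      (fun d p => d.insert p.1 (d.getD p.1 0 + p.2)) (PySem.Dict.counter A)).keys.Nodup := by
    rw [hkeys]; exact PySem.Set.nodup_ofList _
  set D := (PySem.Dict.counter B).items.foldl
      (fun d p => d.insert p.1 (d.getD p.1 0 + p.2)) (PySem.Dict.counter A) with hD
  rw [PySem.Dict.items_eq_map_keys D hnod 0,
    PySem.Dict.items_eq_map_keys (PySem.Dict.counter (A ++ B)) (PySem.Dict.nodup_keys_counter _) 0,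
    hkeys, PySem.Dict.keys_counter]
  refine List.map_congr_left ?_
  intro k hk
  refine Prod.ext rfl ?_
  simp only
  rw [hD, getD_foldl_addEntry, PySem.Dict.getD_counter, PySem.Dict.getD_counter,
    PySem.Dict.items_counter, List.filter_map]
  have hf : ((PySem.Set.ofList B).filter ((fun p => p.1 == k) ∘ fun j => (j, (B.count j : Int))))
      = (PySem.Set.ofList B).filter (· == k) := by
    simp [Function.comp_def]
  rw [hf, filter_beq_of_nodup _ (PySem.Set.nodup_ofList B) k]
  by_cases hkB : k ∈ B
  · simp [PySem.Set.mem_ofList, hkB, List.count_append]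
  · simp [PySem.Set.mem_ofList, hkB, List.count_append, List.count_eq_zero.mpr hkB]

-- B computes the counter of the valid bigram list
lemma conquer_eq (cs : List Char) : pvConquer cs = PySem.Dict.counter (pvVB cs) := by
  fun_induction pvConquer cs with
  | case1 cs h st hcond =>
    have hst : st = PySem.Chars.lower cs := rfl
    have hlen : cs.length = 2 := by
      have h2 := hcond
      simp [hst, PySem.Chars.lower] at h2
      exact h2.1.1
    match cs, hlen with
    | [a, b], _ =>
      have hst2 : st = [PySem.Chars.lowerChar a, PySem.Chars.lowerChar b] := hst
      simp only [hst2] at hcond ⊢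
      simp only [pvVB, pvAdj, List.map, List.filter, PySem.Chars.lower]
      rcases hb : (PySem.Chars.strIsalpha [PySem.Chars.lowerChar a, PySem.Chars.lowerChar b]
          && [PySem.Chars.lowerChar a, PySem.Chars.lowerChar b].all (fun c => decide (c.toNat ≤ 127))) with _ | _
      · rw [Bool.and_assoc, hb, Bool.and_false] at hcond
        exact absurd hcond (by simp)
      · simp only [List.map]
        rfl
  | case2 cs h st hcond =>
    have hst : st = PySem.Chars.lower cs := rfl
    match cs, h with
    | [], _ => simp [pvVB, pvAdj]; rfl
    | [a], _ => simp [pvVB, pvAdj]; rfl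
    | [a, b], _ =>
      have hst2 : st = [PySem.Chars.lowerChar a, PySem.Chars.lowerChar b] := hst
      simp only [hst2] at hcond
      simp only [pvVB, pvAdj, List.map, List.filter, PySem.Chars.lower]
      rcases hb : (PySem.Chars.strIsalpha [PySem.Chars.lowerChar a, PySem.Chars.lowerChar b]
          && [PySem.Chars.lowerChar a, PySem.Chars.lowerChar b].all (fun c => decide (c.toNat ≤ 127))) with _ | _
      · simp only [List.map]
        rfl
      · rw [Bool.and_assoc] at hcond
        exact absurd (by rw [hb]; simp) hcond
  | case3 cs h m left right ih1 ih2 =>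
    show (pvConquer (List.drop m cs)).items.foldl (fun d p => d.insert p.1 (d.getD p.1 0 + p.2))
        (pvConquer (List.take (m + 1) cs)) = PySem.Dict.counter (pvVB cs)
    rw [ih1, ih2, merge_counters, vb_split]

-- A's index loop reads off exactly the adjacent bigrams
lemma range_bigrams (cs : List Char) :
    (PySem.List.pyRange 0 ((cs.length : Int) - 1) 1).map
      (fun i => PySem.Chars.lower [PySem.List.pyGetD cs i ' ', PySem.List.pyGetD cs (i + 1) ' '])
      = (pvAdj cs).map PySem.Chars.lower := by
  rcases cs with _ | ⟨a, cs'⟩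
  · simp [PySem.List.pyRange_one_eq_nil (by norm_num : (-1 : Int) ≤ 0), pvAdj]
  · have hb : (((a :: cs').length : Int) - 1) = (((a :: cs').length - 1 : Nat) : Int) := by
      simp
    rw [hb, PySem.List.pyRange_zero_natCast, List.map_map, ← adj_range (a :: cs'), List.map_map]
    refine List.map_congr_left ?_
    intro k _
    simp only [Function.comp_def, PySem.List.pyGetD_natCast]
    rw [show ((k : Int) + 1) = ((k + 1 : Nat) : Int) by push_cast; ring,
      PySem.List.pyGetD_natCast]

-- A computes the counter of the same valid bigram list
lemma a_eq (s : String) :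
    getMultiCountSet s = (PySem.Dict.counter (pvVB s.toList)).items := by
  unfold getMultiCountSet
  simp only [PySem.Str.len_eq]
  rw [foldl_if_filter (PySem.List.pyRange 0 ((s.toList.length : Int) - 1) 1)
    (fun i => PySem.Chars.lower [PySem.List.pyGetD s.toList i ' ', PySem.List.pyGetD s.toList (i + 1) ' '])
    (fun st => PySem.Chars.strIsalpha st && st.all (fun c => c.toNat ≤ 127))
    (fun (d : PySem.Dict String Int) st =>
      d.insert (String.ofList st) (d.getD (String.ofList st) 0 + 1))
    PySem.Dict.empty]
  rw [range_bigrams]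
  congr 1
  simp only [pvVB]
  rw [← PySem.Dict.foldl_insert_getD_add_one_eq_counter, List.foldl_map]

-- ===== VERDICT (by name: the statement is the Claim_ definition above) =====
theorem getMultiCountSet_spec : Claim_equal_getMultiCountSet := by
  intro s _
  unfold Spec_getMultiCountSet getMultiCountSet_alt
  rw [a_eq, conquer_eq]
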